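-- pv_equiv track=rewrite | github.com/fescofesco/CCC | Challenge 2025/Felix/level5/comprehensive_validator.py | check_collision_radius_2
-- ===== SOURCE A (Python) =====
-- def check_collision_radius_2(path, asteroid_x, asteroid_y):
--     """
--     Check collision with radius 2 around asteroid (5x5 grid).
--     Spaceship cannot enter within 2 squares (Chebyshev distance) of asteroid.
--     """
--     forbidden_positions = set()
--     for dx in range(-2, 3):  # -2, -1, 0, 1, 2
--         for dy in range(-2, 3):  # -2, -1, 0, 1, 2
--             forbidden_positions.add((asteroid_x + dx, asteroid_y + dy))
--
--     collisions = []
--     for i, (x, y) in enumerate(path):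
--         if (x, y) in forbidden_positions:
--             collisions.append((i, x, y))
--
--     return collisions
-- ===== SOURCE B (Python) =====
-- def check_collision_radius_2(path, asteroid_x, asteroid_y):
--     """Invert the strategy: build a hash index coordinate -> indices in one pass,
--     then probe the 25 cells of the 5x5 zone in the index and sort hits by path index."""
--     index = {}
--     for i, (x, y) in enumerate(path):
--         index[(x, y)] = index.get((x, y), []) + [i]
--     hits = []
--     for dx in range(-2, 3):
--         for dy in range(-2, 3):
--             for i in index.get((asteroid_x + dx, asteroid_y + dy), []):
--                 hits.append((i, asteroid_x + dx, asteroid_y + dy))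
--     hits.sort(key=lambda t: t[0])
--     return hits
-- ===== Notes on version B (the rewrite author's own statement) =====
-- stated objective: alternative
-- what changed: Inverts A's strategy: instead of precomputing a forbidden-cell set and membership-testing every path point, B builds a coordinate->indices hash index of the path in one pass, probes only the 25 cells of the 5x5 zone in that index, and sorts the hits by path index to restore path order.
import Mathlib
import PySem

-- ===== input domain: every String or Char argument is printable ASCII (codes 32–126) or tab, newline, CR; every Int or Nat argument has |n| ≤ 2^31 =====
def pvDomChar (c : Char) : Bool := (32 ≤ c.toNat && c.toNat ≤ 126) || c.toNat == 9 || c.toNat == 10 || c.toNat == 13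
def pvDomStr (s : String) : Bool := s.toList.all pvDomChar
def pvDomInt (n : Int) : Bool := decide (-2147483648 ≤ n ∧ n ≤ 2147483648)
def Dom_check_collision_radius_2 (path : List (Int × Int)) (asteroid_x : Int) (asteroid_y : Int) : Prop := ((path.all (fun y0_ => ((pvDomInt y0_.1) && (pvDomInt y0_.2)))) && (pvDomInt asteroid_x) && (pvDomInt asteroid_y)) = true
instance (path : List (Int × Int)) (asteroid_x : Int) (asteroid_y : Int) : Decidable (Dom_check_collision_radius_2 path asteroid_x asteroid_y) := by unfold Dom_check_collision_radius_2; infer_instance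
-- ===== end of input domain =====

-- B inverts A's strategy: instead of a precomputed forbidden-cell set membership-tested against
-- every path point, B builds a coordinate->indices index of the path, probes the 25 zone cells in
-- it, and sorts the hits by path index (objective: alternative algorithm, same result).

-- ===== PORT A =====
-- the two nested range(-2,3) loops filling forbidden_positions
def ccr2_forbidden (asteroid_x asteroid_y : Int) : PySem.Set (Int × Int) :=
  (PySem.List.pyRange (-2) 3 1).foldl (fun s dx =>
    (PySem.List.pyRange (-2) 3 1).foldl (fun s dy =>
      PySem.Set.add s (asteroid_x + dx, asteroid_y + dy)) s)
    PySem.Set.empty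

def check_collision_radius_2 (path : List (Int × Int)) (asteroid_x : Int) (asteroid_y : Int) : List (Int × Int × Int) :=
  let forbidden := ccr2_forbidden asteroid_x asteroid_y
  (PySem.List.enumerate path).foldl (fun collisions p =>
    if PySem.Set.contains forbidden (p.2.1, p.2.2) then collisions ++ [(p.1, p.2.1, p.2.2)]
    else collisions) []

-- ===== PORT B =====
-- pass 1: index[(x, y)] = index.get((x, y), []) + [i]
def ccr2_index (path : List (Int × Int)) : PySem.Dict (Int × Int) (List Int) :=
  (PySem.List.enumerate path).foldl
    (fun d p => d.modify p.2 [] (fun l => l ++ [p.1])) PySem.Dict.empty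

def check_collision_radius_2_alt (path : List (Int × Int)) (asteroid_x : Int) (asteroid_y : Int) : List (Int × Int × Int) :=
  let index := ccr2_index path
  let hits := (PySem.List.pyRange (-2) 3 1).foldl (fun hits dx =>
    (PySem.List.pyRange (-2) 3 1).foldl (fun hits dy =>
      (index.getD (asteroid_x + dx, asteroid_y + dy) []).foldl
        (fun hits i => hits ++ [(i, asteroid_x + dx, asteroid_y + dy)]) hits) hits) []
  PySem.List.sorted hits (fun t => t.1) false

-- ===== PRECONDITION & SPEC =====
def Spec_check_collision_radius_2 (path : List (Int × Int)) (asteroid_x : Int) (asteroid_y : Int) (out : List (Int × Int × Int)) : Prop := out = check_collision_radius_2_alt path asteroid_x asteroid_y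
instance (path : List (Int × Int)) (asteroid_x : Int) (asteroid_y : Int) (out : List (Int × Int × Int)) : Decidable (Spec_check_collision_radius_2 path asteroid_x asteroid_y out) := by unfold Spec_check_collision_radius_2; infer_instance

-- ===== CLAIM (what is proved, stated in full; the proofs are below) =====
def Claim_equal_check_collision_radius_2 : Prop := ∀ (path : List (Int × Int)) (asteroid_x : Int) (asteroid_y : Int), Dom_check_collision_radius_2 path asteroid_x asteroid_y → Spec_check_collision_radius_2 path asteroid_x asteroid_y (check_collision_radius_2 path asteroid_x asteroid_y)

-- ===== LEMMAS AND PROOFS =====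

-- ---- A side: membership in the 25-entry table is the Chebyshev test ----
lemma ccr2_mem_foldl {α β : Type} [BEq α] [LawfulBEq α] (g : PySem.Set α → β → PySem.Set α)
    (P : β → α → Prop) (hg : ∀ s y x, x ∈ g s y ↔ x ∈ s ∨ P y x) :
    ∀ (l : List β) (s : PySem.Set α) (x : α), x ∈ l.foldl g s ↔ x ∈ s ∨ ∃ y ∈ l, P y x := by
  intro l
  induction l with
  | nil => simp
  | cons h t ih =>
    intro s x
    simp only [List.foldl, ih, hg, List.mem_cons]
    constructor
    · rintro ((hs | hp) | ⟨y, hy, hpy⟩)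
      · exact Or.inl hs
      · exact Or.inr ⟨h, Or.inl rfl, hp⟩
      · exact Or.inr ⟨y, Or.inr hy, hpy⟩
    · rintro (hs | ⟨y, (rfl | hy), hpy⟩)
      · exact Or.inl (Or.inl hs)
      · exact Or.inl (Or.inr hpy)
      · exact Or.inr ⟨y, hy, hpy⟩

lemma ccr2_inner_mem (ax ay dx : Int) (s : PySem.Set (Int × Int)) (p : Int × Int) :
    p ∈ (PySem.List.pyRange (-2) 3 1).foldl
        (fun s dy => PySem.Set.add s (ax + dx, ay + dy)) s
      ↔ p ∈ s ∨ ∃ dy ∈ PySem.List.pyRange (-2) 3 1, p = (ax + dx, ay + dy) :=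
  ccr2_mem_foldl (fun s dy => PySem.Set.add s (ax + dx, ay + dy))
    (fun dy p => p = (ax + dx, ay + dy))
    (fun s dy p => PySem.Set.mem_add s (ax + dx, ay + dy) p)
    (PySem.List.pyRange (-2) 3 1) s p

lemma ccr2_outer_mem (ax ay : Int) (p : Int × Int) :
    p ∈ ccr2_forbidden ax ay
      ↔ p ∈ (PySem.Set.empty : PySem.Set (Int × Int)) ∨
        ∃ dx ∈ PySem.List.pyRange (-2) 3 1, ∃ dy ∈ PySem.List.pyRange (-2) 3 1,
          p = (ax + dx, ay + dy) := by
  unfold ccr2_forbidden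
  exact ccr2_mem_foldl
    (fun s dx => (PySem.List.pyRange (-2) 3 1).foldl
      (fun s dy => PySem.Set.add s (ax + dx, ay + dy)) s)
    (fun dx p => ∃ dy ∈ PySem.List.pyRange (-2) 3 1, p = (ax + dx, ay + dy))
    (fun s dx p => ccr2_inner_mem ax ay dx s p)
    (PySem.List.pyRange (-2) 3 1) PySem.Set.empty p

lemma ccr2_mem_iff (ax ay x y : Int) :
    ((x, y) ∈ ccr2_forbidden ax ay) ↔ max (x - ax).natAbs (y - ay).natAbs ≤ 2 := by
  rw [ccr2_outer_mem]
  simp only [PySem.Set.empty, List.not_mem_nil, false_or, PySem.List.mem_pyRange_one,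
    Prod.mk.injEq]
  constructor
  · rintro ⟨dx, h1, dy, h2, h3, h4⟩; omega
  · intro h; exact ⟨x - ax, by omega, y - ay, by omega, by omega, by omega⟩

lemma ccr2_contains_eq_decide_mem {α : Type} [BEq α] [LawfulBEq α] [DecidableEq α]
    (s : PySem.Set α) (a : α) : PySem.Set.contains s a = decide (a ∈ s) := by
  by_cases h : a ∈ s
  · simp only [h, decide_true]; exact List.contains_iff_mem.mpr h
  · simp only [h, decide_false]
    cases hc : PySem.Set.contains s a with
    | false => rfl
    | true => exact absurd (List.contains_iff_mem.mp hc) h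

lemma ccr2_list_contains {α : Type} [BEq α] [LawfulBEq α] [DecidableEq α]
    (l : List α) (a : α) : l.contains a = decide (a ∈ l) := by
  by_cases h : a ∈ l
  · simp only [h, decide_true]; exact List.contains_iff_mem.mpr h
  · simp only [h, decide_false]
    cases hc : l.contains a with
    | false => rfl
    | true => exact absurd (List.contains_iff_mem.mp hc) h

lemma ccr2_contains (ax ay x y : Int) :
    PySem.Set.contains (ccr2_forbidden ax ay) (x, y)
      = decide (max (x - ax).natAbs (y - ay).natAbs ≤ 2) := by
  rw [ccr2_contains_eq_decide_mem (ccr2_forbidden ax ay) (x, y)]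
  exact decide_eq_decide.mpr (ccr2_mem_iff ax ay x y)

-- A's collision loop, with a pending accumulator
lemma ccr2_loopA (ax ay : Int) :
    ∀ (l : List (Int × Int × Int)) (acc : List (Int × Int × Int)),
      l.foldl (fun collisions p =>
        if PySem.Set.contains (ccr2_forbidden ax ay) (p.2.1, p.2.2) then
          collisions ++ [(p.1, p.2.1, p.2.2)]
        else collisions) acc
      = acc ++ (l.filter (fun p =>
          decide (max (p.2.1 - ax).natAbs (p.2.2 - ay).natAbs ≤ 2))).map
          (fun p => (p.1, p.2.1, p.2.2))
  | [], acc => by simp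
  | p :: t, acc => by
    simp only [List.foldl_cons]
    rw [ccr2_contains ax ay p.2.1 p.2.2, ccr2_loopA ax ay t, List.filter_cons]
    by_cases hc : max (p.2.1 - ax).natAbs (p.2.2 - ay).natAbs ≤ 2
    · simp [hc]
    · simp [hc]

-- A's output is the filtered-and-projected enumeration
lemma ccr2_A_eq (path : List (Int × Int)) (ax ay : Int) :
    check_collision_radius_2 path ax ay
      = ((PySem.List.enumerate path).filter
          (fun p => decide (max (p.2.1 - ax).natAbs (p.2.2 - ay).natAbs ≤ 2))).map
          (fun p => (p.1, p.2.1, p.2.2)) := by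
  show (PySem.List.enumerate path).foldl (fun collisions p =>
      if PySem.Set.contains (ccr2_forbidden ax ay) (p.2.1, p.2.2) then
        collisions ++ [(p.1, p.2.1, p.2.2)]
      else collisions) [] = _
  rw [ccr2_loopA ax ay]
  simp

-- ---- B side ----
-- the index dict groups the enumeration by coordinate
lemma ccr2_index_getD (path : List (Int × Int)) (c : Int × Int) :
    (ccr2_index path).getD c []
      = ((PySem.List.enumerate path).filter (fun p => p.2 == c)).map (fun p => p.1) := by
  unfold ccr2_index
  have h : (PySem.List.enumerate path).foldl
      (fun d p => d.modify p.2 [] (fun l => l ++ [p.1])) PySem.Dict.empty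
    = ((PySem.List.enumerate path).map Prod.swap).foldl
      (fun d p => d.modify p.1 [] (fun l => l ++ [p.2])) PySem.Dict.empty := by
    rw [List.foldl_map]
    rfl
  rw [h, PySem.Dict.getD_foldl_modify_append]
  simp [List.filter_map, Function.comp_def, List.map_map]

-- the 25 probed cells
def ccr2_cells (ax ay : Int) : List (Int × Int) :=
  (PySem.List.pyRange (-2) 3 1).flatMap (fun dx =>
    (PySem.List.pyRange (-2) 3 1).map (fun dy => (ax + dx, ay + dy)))

lemma ccr2_mem_cells (ax ay : Int) (c : Int × Int) :
    c ∈ ccr2_cells ax ay ↔ max (c.1 - ax).natAbs (c.2 - ay).natAbs ≤ 2 := by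
  obtain ⟨c1, c2⟩ := c
  unfold ccr2_cells
  simp only [List.mem_flatMap, List.mem_map, PySem.List.mem_pyRange_one, Prod.mk.injEq]
  constructor
  · rintro ⟨dx, h1, dy, h2, h3, h4⟩; omega
  · intro h
    exact ⟨c1 - ax, by omega, c2 - ay, by omega, by omega, by omega⟩

lemma ccr2_cells_nodup (ax ay : Int) : (ccr2_cells ax ay).Nodup := by
  have hbase : ((PySem.List.pyRange (-2) 3 1).flatMap (fun dx =>
      (PySem.List.pyRange (-2) 3 1).map (fun dy => ((dx, dy) : Int × Int)))).Nodup := by decide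
  have : ccr2_cells ax ay
      = ((PySem.List.pyRange (-2) 3 1).flatMap (fun dx =>
          (PySem.List.pyRange (-2) 3 1).map (fun dy => ((dx, dy) : Int × Int)))).map
        (fun q => (ax + q.1, ay + q.2)) := by
    unfold ccr2_cells
    simp [List.map_flatMap, List.map_map, Function.comp_def]
  rw [this]
  exact hbase.map (fun a b hab => by
    obtain ⟨a1, a2⟩ := a; obtain ⟨b1, b2⟩ := b
    simp only [Prod.mk.injEq] at hab ⊢
    omega)

-- B's hits before sorting, as a flatMap over the cells
lemma ccr2_hits_eq (path : List (Int × Int)) (ax ay : Int) :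
    ((PySem.List.pyRange (-2) 3 1).foldl (fun hits dx =>
        (PySem.List.pyRange (-2) 3 1).foldl (fun hits dy =>
          ((ccr2_index path).getD (ax + dx, ay + dy) []).foldl
            (fun hits i => hits ++ [(i, ax + dx, ay + dy)]) hits) hits) [])
      = (ccr2_cells ax ay).flatMap (fun c =>
          ((ccr2_index path).getD c []).map (fun i => (i, c.1, c.2))) := by
  simp only [PySem.List.foldl_append_singleton_eq_map, PySem.List.foldl_append_eq_flatMap,
    List.nil_append]
  unfold ccr2_cells
  rw [List.flatMap_assoc]
  simp [List.flatMap_map]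

-- grouping by distinct cells is a permutation of the direct filter
lemma ccr2_group_perm {α κ : Type} [BEq κ] [LawfulBEq κ] (k : α → κ) :
    ∀ (cs : List κ), cs.Nodup → ∀ (E : List α),
      (cs.flatMap (fun c => E.filter (fun e => k e == c))).Perm
        (E.filter (fun e => cs.contains (k e))) := by
  intro cs
  induction cs with
  | nil => intro _ E; simp
  | cons c t ih =>
    intro hnd E
    have hct : c ∉ t := (List.nodup_cons.mp hnd).1
    have hperm := (ih (List.nodup_cons.mp hnd).2 E)
    simp only [List.flatMap_cons]
    have h1 : E.filter (fun e => k e == c)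
        = (E.filter (fun e => (c :: t).contains (k e))).filter (fun e => k e == c) := by
      rw [List.filter_filter]
      apply List.filter_congr
      intro x _
      by_cases h : k x = c <;> simp [h]
    have h2 : E.filter (fun e => t.contains (k e))
        = (E.filter (fun e => (c :: t).contains (k e))).filter (fun e => !(k e == c)) := by
      rw [List.filter_filter]
      apply List.filter_congr
      intro x _
      by_cases h : k x = c
      · simp [h]
        exact hct
      · simp [h]
    refine ((List.Perm.append_left _ hperm).trans ?_)
    rw [h1, h2]
    exact List.filter_append_perm _ _

-- B's pre-sort hits are a permutation of A's output
lemma ccr2_perm (path : List (Int × Int)) (ax ay : Int) :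
    (check_collision_radius_2 path ax ay).Perm
      ((ccr2_cells ax ay).flatMap (fun c =>
        ((ccr2_index path).getD c []).map (fun i => (i, c.1, c.2)))) := by
  have hstep : (ccr2_cells ax ay).flatMap (fun c =>
        ((ccr2_index path).getD c []).map (fun i => (i, c.1, c.2)))
      = ((ccr2_cells ax ay).flatMap (fun c =>
          (PySem.List.enumerate path).filter (fun p => p.2 == c))).map
        (fun p => (p.1, p.2.1, p.2.2)) := by
    rw [List.map_flatMap]
    refine List.flatMap_congr ?_
    intro c hc
    rw [ccr2_index_getD, List.map_map]
    refine List.map_congr_left ?_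
    intro p hp
    have h2 : p.2 = c := beq_iff_eq.mp (List.mem_filter.mp hp).2
    simp [← h2]
  rw [hstep, ccr2_A_eq]
  apply List.Perm.map
  have hgrp := ccr2_group_perm (fun p : Int × Int × Int => p.2) (ccr2_cells ax ay)
    (ccr2_cells_nodup ax ay) (PySem.List.enumerate path)
  have hmemf : (PySem.List.enumerate path).filter
        (fun p => decide (max (p.2.1 - ax).natAbs (p.2.2 - ay).natAbs ≤ 2))
      = (PySem.List.enumerate path).filter
        (fun p => (ccr2_cells ax ay).contains p.2) := by
    apply List.filter_congr
    intro p _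
    rw [ccr2_list_contains]
    exact decide_eq_decide.mpr (ccr2_mem_cells ax ay p.2).symm
  rw [hmemf]
  exact hgrp.symm

-- A's output is strictly increasing in the path index
lemma ccr2_A_pairwise (path : List (Int × Int)) (ax ay : Int) :
    (check_collision_radius_2 path ax ay).Pairwise (fun a b => a.1 < b.1) := by
  rw [ccr2_A_eq]
  rw [List.pairwise_map]
  exact ((PySem.List.pairwise_lt_enumerate path 0).filter _)

-- ===== VERDICT (by name: the statement is the Claim_ definition above) =====
theorem check_collision_radius_2_spec : Claim_equal_check_collision_radius_2 := by
  intro path ax ay _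
  unfold Spec_check_collision_radius_2
  show check_collision_radius_2 path ax ay = check_collision_radius_2_alt path ax ay
  simp only [check_collision_radius_2_alt]
  rw [ccr2_hits_eq]
  exact (PySem.List.sorted_eq_of_perm_of_pairwise_lt _ _ _
    (ccr2_perm path ax ay) (ccr2_A_pairwise path ax ay)).symm
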